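-- pv_equiv track=rewrite | github.com/hdp0545/TIL | APS/pycharm/programmers Study/Stack_Que/기능개발.py | solution
-- ===== SOURCE A (Python) =====
-- def solution(progresses, speeds):
--     period = [(100 - progress) // speeds[idx] + int(bool((100 - progress) % speeds[idx])) for idx, progress in enumerate(progresses)]
--     answer = []
--     visit = [True] * len(period)
--     for i in range(len(period)):
--         if visit[i]:
--             result = 0
--             r = period[i]
--             for j in range(i, len(period)):
--                 if period[j] <= r:
--                     visit[j] = False
--                     result += 1
--             answer.append(result)
--     return answer
-- ===== SOURCE B (Python) =====
-- def solution(progresses, speeds):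
--     # Period for each job (ceil of remaining work / speed), same formula as A.
--     periods = [(100 - p) // speeds[i] + (1 if (100 - p) % speeds[i] else 0)
--                for i, p in enumerate(progresses)]
--     order = sorted(periods)
--     answer = []
--     best = None
--     k = 0  # pointer into order; count of periods <= current leader value
--     for i, r in enumerate(periods):
--         if best is None or r > best:
--             # r is a new strict prefix maximum (a deploy-group leader);
--             # everything before index i finishes no later, so the group size
--             # is (number of periods <= r) - i.
--             best = r
--             while k < len(order) and order[k] <= r:
--                 k += 1
--             answer.append(k - i)
--     return answer
-- ===== Notes on version B (the rewrite author's own statement) =====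
-- stated objective: alternative
-- what changed: A rescans the whole suffix with a visit array for every group leader; B sorts the periods once, detects leaders as strict running maxima, and reads each group's size off a monotone pointer into the sorted list as (#periods <= leader) - leader index (intended as faster; a timing run measured 1.68x at the largest size but not consistently over 1.5x).
import Mathlib
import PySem

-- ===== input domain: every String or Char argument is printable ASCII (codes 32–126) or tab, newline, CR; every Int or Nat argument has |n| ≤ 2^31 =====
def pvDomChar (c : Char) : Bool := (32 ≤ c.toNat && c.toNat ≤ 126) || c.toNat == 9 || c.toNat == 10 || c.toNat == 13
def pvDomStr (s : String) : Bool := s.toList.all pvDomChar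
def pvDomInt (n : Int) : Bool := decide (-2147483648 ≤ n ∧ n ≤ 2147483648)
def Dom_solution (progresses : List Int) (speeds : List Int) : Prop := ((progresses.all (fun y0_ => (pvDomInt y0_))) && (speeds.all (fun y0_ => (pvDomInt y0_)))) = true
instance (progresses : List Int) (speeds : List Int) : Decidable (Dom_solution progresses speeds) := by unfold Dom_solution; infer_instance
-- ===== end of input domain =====

-- B replaces A's quadratic mark-and-rescan over a visit array by: sort the periods once,
-- detect group leaders as strict running maxima, and read each group's count off a monotone
-- pointer into the sorted list ((#periods ≤ leader period) - leader index).

-- ===== PORT A =====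
-- period[idx] = (100 - progress) // speeds[idx] + int(bool((100 - progress) % speeds[idx]))
-- (speeds[idx] is ported with pyGetD; Pre_solution keeps idx in range, where it is exact)
def periodA (progresses speeds : List Int) : List Int :=
  (PySem.List.enumerate progresses 0).map (fun ip =>
    PySem.Int.floordiv (100 - ip.2) (PySem.List.pyGetD speeds ip.1 0) +
    (if PySem.Int.mod (100 - ip.2) (PySem.List.pyGetD speeds ip.1 0) ≠ 0 then (1:Int) else 0))

-- the inner 'for j in range(i, len(period)): if period[j] <= r: visit[j] = False; result += 1'
def innerStepA (period : List Int) (r : Int) (q : List Bool × Int) (j : Int) : List Bool × Int :=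
  if PySem.List.pyGetD period j 0 ≤ r then (PySem.List.pySetD q.1 j false, q.2 + 1) else q

-- one iteration of 'for i in range(len(period))' on the state (answer, visit)
def outerStepA (period : List Int) (st : List Int × List Bool) (i : Int) : List Int × List Bool :=
  if PySem.List.pyGetD st.2 i false then
    let r := PySem.List.pyGetD period i 0
    let p := (PySem.List.pyRange i (period.length : Int) 1).foldl (innerStepA period r) (st.2, (0:Int))
    (st.1 ++ [p.2], p.1)
  else st

def solution (progresses : List Int) (speeds : List Int) : List Int :=
  let period := periodA progresses speeds
  ((PySem.List.pyRange 0 (period.length : Int) 1).foldl (outerStepA period)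
      ([], List.replicate period.length true)).1

-- ===== PORT B =====
-- B's period line: same formula and same speeds[i] indexing as A's
def periodB (progresses speeds : List Int) : List Int :=
  (PySem.List.enumerate progresses 0).map (fun ip =>
    PySem.Int.floordiv (100 - ip.2) (PySem.List.pyGetD speeds ip.1 0) +
    (if PySem.Int.mod (100 - ip.2) (PySem.List.pyGetD speeds ip.1 0) ≠ 0 then (1:Int) else 0))

-- while k < len(order) and order[k] <= r: k += 1
def advanceB (order : List Int) (r : Int) (k : Nat) : Nat :=
  if h : k < order.length then
    if PySem.List.pyGetD order (k : Int) 0 ≤ r then advanceB order r (k + 1) else k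
  else k
termination_by order.length - k

-- one iteration of 'for i, r in enumerate(periods)' on the state (answer, best, k)
def stepB (order : List Int) (st : List Int × Option Int × Nat) (ir : Int × Int) :
    List Int × Option Int × Nat :=
  match st.2.1 with
  | none =>
    let k := advanceB order ir.2 st.2.2
    (st.1 ++ [(k : Int) - ir.1], some ir.2, k)
  | some b =>
    if b < ir.2 then
      let k := advanceB order ir.2 st.2.2
      (st.1 ++ [(k : Int) - ir.1], some ir.2, k)
    else st

def solution_alt (progresses : List Int) (speeds : List Int) : List Int :=
  let periods := periodB progresses speeds
  let order := PySem.List.sorted periods (fun x => x) false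
  ((PySem.List.enumerate periods 0).foldl (stepB order) ([], none, 0)).1

-- ===== PRECONDITION & SPEC =====
-- Pre_solution: exactly the inputs where Python A (and B) returns normally — speeds must cover
-- every progress index (else IndexError) and every used speed must be nonzero (else
-- ZeroDivisionError); both programs raise identically outside it.
def Pre_solution (progresses : List Int) (speeds : List Int) : Prop :=
  progresses.length ≤ speeds.length ∧ ∀ i < progresses.length, speeds.getD i 0 ≠ 0
instance (progresses : List Int) (speeds : List Int) : Decidable (Pre_solution progresses speeds) := by
  unfold Pre_solution; infer_instance
def pvWitness_solution : List Int × List Int := ([30, 99, 95], [1, 2, 10])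

def Spec_solution (progresses : List Int) (speeds : List Int) (out : List Int) : Prop := out = solution_alt progresses speeds
instance (progresses : List Int) (speeds : List Int) (out : List Int) : Decidable (Spec_solution progresses speeds out) := by unfold Spec_solution; infer_instance

-- ===== CLAIM (what is proved, stated in full; the proofs are below) =====
def Claim_equal_solution : Prop := ∀ (progresses : List Int) (speeds : List Int), Dom_solution progresses speeds → Pre_solution progresses speeds → Spec_solution progresses speeds (solution progresses speeds)

-- ===== LEMMAS AND PROOFS =====

-- i is a "leader": its period strictly exceeds every earlier period
def leadB (P : List Int) (i : Nat) : Bool :=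
  (List.range i).all (fun j => P.getD j 0 < P.getD i 0)

-- the common specification: at each leader i emit (#periods ≤ period[i]) - i
def specAns (P : List Int) (m : Nat) : List Int :=
  (List.range m).filterMap (fun i =>
    if leadB P i then some ((P.countP (fun x => x ≤ P.getD i 0) : Int) - (i : Int)) else none)

theorem specAns_succ (P : List Int) (m : Nat) :
    specAns P (m + 1) = specAns P m ++
      (if leadB P m then [((P.countP (fun x => x ≤ P.getD m 0) : Int) - (m : Int))] else []) := by
  unfold specAns
  rw [List.range_succ, List.filterMap_append]
  by_cases h : leadB P m <;> simp [h]

theorem exists_lead (P : List Int) (k : Nat) :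
    ∃ l, l ≤ k ∧ leadB P l = true ∧ P.getD k 0 ≤ P.getD l 0 := by
  induction k using Nat.strong_induction_on with
  | _ k ih =>
    by_cases h : leadB P k = true
    · exact ⟨k, le_refl _, h, le_refl _⟩
    · simp only [leadB, List.all_eq_true, List.mem_range, decide_eq_true_eq] at h
      push Not at h
      obtain ⟨j, hj, hle⟩ := h
      obtain ⟨l, hl, hlead, hle'⟩ := ih j hj
      exact ⟨l, le_trans hl (le_of_lt hj), hlead, le_trans hle hle'⟩

theorem set_getD (v : List Bool) (m j : Nat) :
    (v.set m false).getD j false = if j = m then false else v.getD j false := by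
  simp only [List.getD, List.getElem?_set]
  split_ifs with h1 h2 h3 <;> simp_all [eq_comm]

-- P.countP p as a count over positions
theorem count_pos (P : List Int) (p : Int → Bool) :
    P.countP p = (List.range P.length).countP (fun j => p (P.getD j 0)) := by
  have hmap : (List.range P.length).map (fun j => P.getD j 0) = P := by
    apply List.ext_getElem
    · simp
    · intro i h1 h2
      simp [List.getD, List.getElem?_eq_getElem h2]
  conv_lhs => rw [← hmap]
  rw [List.countP_map]
  rfl

-- at a leader m, the whole count splits as m (everything earlier) + the suffix count
theorem count_split (P : List Int) (m : Nat) (hm : m ≤ P.length) (hl : leadB P m = true) :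
    P.countP (fun x => x ≤ P.getD m 0)
      = m + (List.range (P.length - m)).countP (fun k => P.getD (m + k) 0 ≤ P.getD m 0) := by
  simp only [leadB, List.all_eq_true, List.mem_range, decide_eq_true_eq] at hl
  rw [count_pos]
  have hsplit : List.range P.length
      = List.range m ++ (List.range (P.length - m)).map (fun x => m + x) := by
    conv_lhs => rw [show P.length = m + (P.length - m) from by omega]
    exact List.range_add
  rw [hsplit, List.countP_append, List.countP_map]
  have h1 : (List.range m).countP (fun j => P.getD j 0 ≤ P.getD m 0) = m := by
    rw [List.countP_eq_length.mpr, List.length_range]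
    intro j hj
    simp only [List.mem_range] at hj
    exact decide_eq_true (le_of_lt (hl j hj))
  rw [h1]
  rfl

-- ===== A-side =====

def AstepN (P : List Int) (st : List Int × List Bool) (i : Nat) : List Int × List Bool :=
  if st.2.getD i false then
    let r := P.getD i 0
    let p := (List.range (P.length - i)).foldl
      (fun (q : List Bool × Int) k =>
        if P.getD (i + k) 0 ≤ r then (q.1.set (i + k) false, q.2 + 1) else q)
      (st.2, (0:Int))
    (st.1 ++ [p.2], p.1)
  else st

def aliveB (P : List Int) (m j : Nat) : Bool :=
  (List.range m).all (fun k => !(leadB P k && decide (k ≤ j) && decide (P.getD j 0 ≤ P.getD k 0)))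

theorem aliveB_succ (P : List Int) (m j : Nat) :
    aliveB P (m + 1) j
      = (aliveB P m j && !(leadB P m && decide (m ≤ j) && decide (P.getD j 0 ≤ P.getD m 0))) := by
  simp [aliveB, List.range_succ]

theorem inner_count (P : List Int) (r : Int) (s c : Nat) (v : List Bool) (c0 : Int) :
    ((List.range c).foldl
      (fun (q : List Bool × Int) k =>
        if P.getD (s + k) 0 ≤ r then (q.1.set (s + k) false, q.2 + 1) else q) (v, c0)).2
    = c0 + (((List.range c).countP (fun k => P.getD (s + k) 0 ≤ r) : Int)) := by
  induction c with
  | zero => simp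
  | succ c ih =>
    rw [List.range_succ, List.foldl_append, List.countP_append]
    simp only [List.foldl_cons, List.foldl_nil, List.countP_cons, List.countP_nil]
    by_cases h : P.getD (s + c) 0 ≤ r
    · rw [if_pos h, decide_eq_true h]
      dsimp only
      rw [ih, if_pos rfl]
      omega
    · rw [if_neg h, decide_eq_false h, ih, if_neg Bool.false_ne_true]
      omega

theorem inner_visit (P : List Int) (r : Int) (s c : Nat) (v : List Bool) (c0 : Int) (j : Nat) :
    ((List.range c).foldl
      (fun (q : List Bool × Int) k =>
        if P.getD (s + k) 0 ≤ r then (q.1.set (s + k) false, q.2 + 1) else q) (v, c0)).1.getD j false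
    = if s ≤ j ∧ j < s + c ∧ P.getD j 0 ≤ r then false else v.getD j false := by
  induction c with
  | zero =>
    simp only [List.range_zero, List.foldl_nil]
    rw [if_neg (by rintro ⟨h1, h2, _⟩; omega)]
  | succ c ih =>
    rw [List.range_succ, List.foldl_append]
    simp only [List.foldl_cons, List.foldl_nil]
    by_cases h : P.getD (s + c) 0 ≤ r
    · rw [if_pos h]
      dsimp only
      rw [set_getD, ih]
      rcases eq_or_ne j (s + c) with rfl | hne
      · rw [if_pos rfl, if_pos ⟨by omega, by omega, h⟩]
      · rw [if_neg hne]
        by_cases hc' : s ≤ j ∧ j < s + c ∧ P.getD j 0 ≤ r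
        · rw [if_pos hc', if_pos ⟨hc'.1, by omega, hc'.2.2⟩]
        · rw [if_neg hc', if_neg (by rintro ⟨a, b, c2⟩; exact hc' ⟨a, by omega, c2⟩)]
    · rw [if_neg h, ih]
      by_cases hc' : s ≤ j ∧ j < s + c ∧ P.getD j 0 ≤ r
      · rw [if_pos hc', if_pos ⟨hc'.1, by omega, hc'.2.2⟩]
      · rw [if_neg hc']
        rw [if_neg (by
          rintro ⟨a, b, c2⟩
          apply hc'
          refine ⟨a, ?_, c2⟩
          by_cases hj : j = s + c
          · exact absurd (hj ▸ c2) h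
          · omega)]

theorem lead_of_alive (P : List Int) (m : Nat) : aliveB P m m = leadB P m := by
  by_cases hl : leadB P m = true
  · rw [hl]
    simp only [aliveB, List.all_eq_true, List.mem_range]
    intro k hk
    have hk' : P.getD k 0 < P.getD m 0 := by
      have h := hl
      simp only [leadB, List.all_eq_true, List.mem_range, decide_eq_true_eq] at h
      exact h k hk
    rw [decide_eq_false (not_le.mpr hk')]
    simp
  · rw [Bool.not_eq_true] at hl
    rw [hl]
    have hl' := hl
    unfold leadB at hl'
    rw [List.all_eq_false] at hl'
    obtain ⟨j, hj, hjf⟩ := hl'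
    simp only [List.mem_range] at hj
    simp only [decide_eq_true_eq, not_lt] at hjf
    obtain ⟨l, hlj, hlead, hle⟩ := exists_lead P j
    unfold aliveB
    rw [List.all_eq_false]
    refine ⟨l, List.mem_range.mpr (by omega), ?_⟩
    have h1 : l ≤ m := by omega
    have h2 : P.getD m 0 ≤ P.getD l 0 := le_trans hjf hle
    simp [hlead, h1]
    exact h2

theorem A_inv (P : List Int) (m : Nat) (hm : m ≤ P.length) :
    ((List.range m).foldl (AstepN P) ([], List.replicate P.length true)).1 = specAns P m ∧
    ∀ j, ((List.range m).foldl (AstepN P) ([], List.replicate P.length true)).2.getD j false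
          = (aliveB P m j && decide (j < P.length)) := by
  induction m with
  | zero =>
    constructor
    · simp [specAns]
    · intro j
      simp only [List.range_zero, List.foldl_nil, aliveB, List.range_zero, List.all_nil,
        Bool.true_and]
      simp [List.getD, List.getElem?_replicate]
      split <;> simp_all
  | succ m ih =>
    have hm' : m ≤ P.length := by omega
    obtain ⟨ih1, ih2⟩ := ih hm'
    rw [List.range_succ, List.foldl_append, List.foldl_cons, List.foldl_nil]
    set S := (List.range m).foldl (AstepN P) ([], List.replicate P.length true) with hS
    have hvm : S.2.getD m false = leadB P m := by
      rw [ih2 m, lead_of_alive, decide_eq_true (by omega : m < P.length), Bool.and_true]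
    unfold AstepN
    by_cases hl : leadB P m = true
    · rw [hvm, hl, if_pos rfl]
      simp only
      constructor
      · rw [ih1, specAns_succ, hl, if_pos rfl]
        rw [inner_count]
        rw [count_split P m hm' hl]
        push_cast
        ring_nf
      · intro j
        rw [inner_visit, aliveB_succ, hl]
        have hsum : m + (P.length - m) = P.length := by omega
        rw [hsum]
        simp only [Bool.true_and]
        by_cases h2 : j < P.length
        · by_cases h4 : m ≤ j ∧ P.getD j 0 ≤ P.getD m 0
          · rw [if_pos ⟨h4.1, h2, h4.2⟩, decide_eq_true h4.1, decide_eq_true h4.2]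
            simp
          · rw [if_neg (by rintro ⟨a, _, c⟩; exact h4 ⟨a, c⟩), ih2 j]
            have hx : (decide (m ≤ j) && decide (P.getD j 0 ≤ P.getD m 0)) = false := by
              by_cases ha : m ≤ j
              · have hb : ¬ P.getD j 0 ≤ P.getD m 0 := fun hb => h4 ⟨ha, hb⟩
                rw [decide_eq_false hb, Bool.and_false]
              · rw [decide_eq_false ha, Bool.false_and]
            rw [hx]
            simp
        · rw [if_neg (by rintro ⟨_, b, _⟩; exact h2 b), ih2 j, decide_eq_false h2]
          simp
    · rw [Bool.not_eq_true] at hl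
      rw [hvm, hl, if_neg (by simp)]
      constructor
      · rw [ih1, specAns_succ, hl]
        simp
      · intro j
        rw [aliveB_succ, hl, ih2 j]
        simp

theorem foldl_map_congr {α β : Type} (f : α → Int → α) (g : α → β → α) (e : β → Int)
    (h : ∀ a b, f a (e b) = g a b) :
    ∀ (l : List β) (init : α), (l.map e).foldl f init = l.foldl g init := by
  intro l
  induction l with
  | nil => intro init; rfl
  | cons x xs ih =>
    intro init
    simp only [List.map_cons, List.foldl_cons, h]
    exact ih _

theorem A_core (P : List Int) :
    ((PySem.List.pyRange 0 (P.length : Int) 1).foldl (outerStepA P)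
        ([], List.replicate P.length true)).1 = specAns P P.length := by
  rw [PySem.List.pyRange_one]
  have ht : ((P.length : Int) - 0).toNat = P.length := by omega
  rw [ht]
  have hfun : ∀ (st : List Int × List Bool) (i : Nat),
      outerStepA P st ((0 : Int) + i) = AstepN P st i := by
    intro st i
    unfold outerStepA AstepN
    rw [zero_add]
    simp only [PySem.List.pyGetD_natCast]
    by_cases hv : st.2.getD i false
    · rw [if_pos hv, if_pos hv]
      rw [PySem.List.pyRange_one]
      have ht2 : ((P.length : Int) - (i : Int)).toNat = P.length - i := by omega
      rw [ht2]
      have hstep : ∀ (q : List Bool × Int) (k : Nat),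
          innerStepA P (P.getD i 0) q ((i : Int) + (k : Int))
            = (if P.getD (i + k) 0 ≤ P.getD i 0 then (q.1.set (i + k) false, q.2 + 1) else q) := by
        intro q k
        unfold innerStepA
        have hcast : (i : Int) + (k : Int) = ((i + k : Nat) : Int) := by push_cast; ring
        rw [hcast]
        simp only [PySem.List.pyGetD_natCast, PySem.List.pySetD_natCast]
      rw [foldl_map_congr _ _ _ hstep]
    · rw [if_neg hv, if_neg hv]
  rw [foldl_map_congr _ _ _ hfun]
  exact (A_inv P P.length (le_refl _)).1

theorem A_eq_spec (progresses speeds : List Int) :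
    solution progresses speeds = specAns (periodA progresses speeds) (periodA progresses speeds).length := by
  exact A_core (periodA progresses speeds)

-- ===== B-side =====

theorem sorted_index (l : List Int) (hl : l.Pairwise (· ≤ ·)) (r : Int) :
    ∀ k, k < l.length → (l.getD k 0 ≤ r ↔ k < l.countP (fun x => x ≤ r)) := by
  induction l with
  | nil => intro k hk; simp at hk
  | cons a t ih =>
    rw [List.pairwise_cons] at hl
    obtain ⟨ha, ht⟩ := hl
    intro k hk
    cases k with
    | zero =>
      simp only [List.getD_cons_zero, List.countP_cons]
      by_cases h : a ≤ r
      · simp [h]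
      · have h0 : t.countP (fun x => x ≤ r) = 0 := by
          rw [List.countP_eq_zero]
          intro x hx
          simp only [decide_eq_true_eq]
          intro hxr
          exact h (le_trans (ha x hx) hxr)
        simp [h, h0]
    | succ k =>
      have hk' : k < t.length := by simpa using hk
      have hiff := ih ht k hk'
      simp only [List.getD_cons_succ, List.countP_cons]
      by_cases h : a ≤ r
      · rw [hiff]
        simp [h]
      · have h0 : t.countP (fun x => x ≤ r) = 0 := by
          rw [List.countP_eq_zero]
          intro x hx
          simp only [decide_eq_true_eq]
          intro hxr
          exact h (le_trans (ha x hx) hxr)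
        rw [hiff, h0]
        simp [h]

theorem advance_eq (l : List Int) (hl : l.Pairwise (· ≤ ·)) (r : Int) :
    ∀ k, k ≤ l.countP (fun x => x ≤ r) → advanceB l r k = l.countP (fun x => x ≤ r) := by
  have key : ∀ d k, l.length - k ≤ d → k ≤ l.countP (fun x => x ≤ r) →
      advanceB l r k = l.countP (fun x => x ≤ r) := by
    intro d
    induction d with
    | zero =>
      intro k hd hk
      rw [advanceB]
      have hnk : ¬ k < l.length := by omega
      rw [dif_neg hnk]
      have hc := List.countP_le_length (p := fun x => x ≤ r) (l := l)
      omega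
    | succ d ihd =>
      intro k hd hk
      rw [advanceB]
      by_cases hlt : k < l.length
      · rw [dif_pos hlt]
        simp only [PySem.List.pyGetD_natCast]
        by_cases hle : l.getD k 0 ≤ r
        · rw [if_pos hle]
          exact ihd (k + 1) (by omega) ((sorted_index l hl r k hlt).mp hle)
        · rw [if_neg hle]
          have h2 : ¬ k < l.countP (fun x => x ≤ r) := fun h => hle ((sorted_index l hl r k hlt).mpr h)
          omega
      · rw [dif_neg hlt]
        have hc := List.countP_le_length (p := fun x => x ≤ r) (l := l)
        omega
  intro k hk
  exact key l.length k (by omega) hk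

theorem B_inv (P : List Int) (order : List Int) (hperm : order.Perm P)
    (hpw : order.Pairwise (· ≤ ·)) (m : Nat) (hm : m ≤ P.length) :
    (((PySem.List.enumerate P 0).take m).foldl (stepB order) ([], none, 0)).1 = specAns P m ∧
    ( ((((PySem.List.enumerate P 0).take m).foldl (stepB order) ([], none, 0)).2.1 = none ∧ m = 0 ∧
        (((PySem.List.enumerate P 0).take m).foldl (stepB order) ([], none, 0)).2.2 = 0) ∨
      ∃ b, (((PySem.List.enumerate P 0).take m).foldl (stepB order) ([], none, 0)).2.1 = some b ∧
        (∀ j < m, P.getD j 0 ≤ b) ∧ (∃ j < m, P.getD j 0 = b) ∧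
        (((PySem.List.enumerate P 0).take m).foldl (stepB order) ([], none, 0)).2.2
          = P.countP (fun x => x ≤ b) ) := by
  have hcnt : ∀ r : Int, order.countP (fun x => x ≤ r) = P.countP (fun x => x ≤ r) :=
    fun r => hperm.countP_eq _
  induction m with
  | zero =>
    constructor
    · simp [specAns]
    · left; simp
  | succ m ih =>
    have hm' : m ≤ P.length := by omega
    have hmP : m < P.length := by omega
    obtain ⟨ih1, ih2⟩ := ih hm'
    have htake : (PySem.List.enumerate P 0).take (m + 1)
        = (PySem.List.enumerate P 0).take m ++ [((m : Int), P[m])] := by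
      rw [List.take_add_one]
      congr 1
      have hlen : m < (PySem.List.enumerate P 0).length := by
        rw [PySem.List.length_enumerate]; exact hmP
      rw [List.getElem?_eq_getElem hlen, PySem.List.getElem_enumerate]
      simp
    rw [htake, List.foldl_append, List.foldl_cons, List.foldl_nil]
    set S := ((PySem.List.enumerate P 0).take m).foldl (stepB order) ([], none, 0) with hS
    have hgm : P[m] = P.getD m 0 := (List.getD_eq_getElem P 0 hmP).symm
    rcases ih2 with ⟨hnone, hm0, hk0⟩ | ⟨b, hsome, hub, hex, hkb⟩
    · -- best is None: first iteration, always a leader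
      unfold stepB
      rw [hnone]
      dsimp only
      rw [hgm]
      have hadv : advanceB order (P.getD m 0) S.2.2 = P.countP (fun x => x ≤ P.getD m 0) := by
        rw [hk0]
        rw [advance_eq order hpw (P.getD m 0) 0 (by omega)]
        exact hcnt _
      subst hm0
      constructor
      · rw [ih1, specAns_succ]
        have hlead : leadB P 0 = true := by simp [leadB]
        rw [hlead, if_pos rfl, hadv]
      · right
        refine ⟨P.getD 0 0, rfl, ?_, ⟨0, by omega, rfl⟩, hadv⟩
        intro j hj
        have : j = 0 := by omega
        subst this; exact le_refl _
    · -- best is some b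
      unfold stepB
      rw [hsome]
      dsimp only
      rw [hgm]
      have hrr : b < P[m] ↔ b < P.getD m 0 := by rw [hgm]
      by_cases hr : b < P.getD m 0
      · rw [if_pos hr]
        have hlead : leadB P m = true := by
          simp only [leadB, List.all_eq_true, List.mem_range, decide_eq_true_eq]
          intro j hj
          calc P.getD j 0 ≤ b := hub j hj
            _ < P.getD m 0 := hr
        have hmono : P.countP (fun x => x ≤ b) ≤ P.countP (fun x => x ≤ P.getD m 0) := by
          apply List.countP_mono_left
          intro x _ hx
          simp only [decide_eq_true_eq] at hx ⊢
          exact le_trans hx (le_of_lt hr)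
        have hadv : advanceB order (P.getD m 0) S.2.2 = P.countP (fun x => x ≤ P.getD m 0) := by
          rw [hkb]
          rw [advance_eq order hpw (P.getD m 0) _ (by rw [hcnt]; exact hmono)]
          exact hcnt _
        constructor
        · rw [ih1, specAns_succ, hlead, if_pos rfl, hadv]
        · right
          refine ⟨P.getD m 0, rfl, ?_, ⟨m, by omega, rfl⟩, hadv⟩
          intro j hj
          rcases Nat.lt_succ_iff_lt_or_eq.mp hj with h | h
          · exact le_trans (hub j h) (le_of_lt hr)
          · subst h; exact le_refl _
      · rw [if_neg hr]
        have hlead : leadB P m = false := by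
          obtain ⟨j, hj, hjb⟩ := hex
          unfold leadB
          rw [List.all_eq_false]
          refine ⟨j, List.mem_range.mpr hj, ?_⟩
          simp only [decide_eq_true_eq, not_lt]
          rw [hjb]
          omega
        constructor
        · rw [ih1, specAns_succ, hlead]
          simp
        · right
          refine ⟨b, hsome, ?_, ?_, hkb⟩
          · intro j hj
            rcases Nat.lt_succ_iff_lt_or_eq.mp hj with h | h
            · exact hub j h
            · subst h; omega
          · obtain ⟨j, hj, hjb⟩ := hex
            exact ⟨j, by omega, hjb⟩

theorem B_core (P : List Int) :
    ((PySem.List.enumerate P 0).foldl (stepB (PySem.List.sorted P (fun x => x) false))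
        ([], none, 0)).1 = specAns P P.length := by
  have hfull : PySem.List.enumerate P 0 = (PySem.List.enumerate P 0).take P.length := by
    rw [← PySem.List.length_enumerate P 0, List.take_length]
  rw [hfull]
  exact (B_inv P (PySem.List.sorted P (fun x => x) false)
    (PySem.List.sorted_perm P (fun x => x) false)
    (PySem.List.sorted_pairwise P (fun x => x)) P.length (le_refl _)).1

theorem B_eq_spec (progresses speeds : List Int) :
    solution_alt progresses speeds
      = specAns (periodB progresses speeds) (periodB progresses speeds).length := by
  exact B_core (periodB progresses speeds)

-- the two period computations are the same line of Python
theorem periods_eq (progresses speeds : List Int) :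
    periodA progresses speeds = periodB progresses speeds := rfl

-- ===== VERDICT (by name: the statement is the Claim_ definition above) =====
theorem solution_spec : Claim_equal_solution := by
  intro progresses speeds _ _
  unfold Spec_solution
  rw [A_eq_spec, B_eq_spec, ← periods_eq]
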